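-- pv_equiv track=rewrite | github.com/riteshbhirud/accel-cutting-magic-state | task3_d3_exact.py | build_variant
-- ===== SOURCE A (Python) =====
-- d3_injection_line = 36
--
-- d3_cult_tdag_line = 78
--
-- d3_cult_t_line = 100
--
-- d3_cult_qubits = [0, 3, 7, 9, 10, 12, 13]
--
-- def build_variant(lines, inj_mode, cult_tdag_mode, cult_t_mode):
--     result = []
--     for i, line in enumerate(lines):
--         if i == d3_injection_line:
--             if inj_mode == "I":
--                 result.append("TICK")
--                 continue
--             elif inj_mode == "Z":
--                 result.append("Z 3")
--                 continue
--         if i == d3_cult_tdag_line: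
--             if cult_tdag_mode == "I":
--                 result.append("TICK")
--                 continue
--             elif cult_tdag_mode == "Z":
--                 result.append(f"Z {' '.join(str(q) for q in d3_cult_qubits)}")
--                 continue
--         if i == d3_cult_t_line:
--             if cult_t_mode == "I":
--                 result.append("TICK")
--                 continue
--             elif cult_t_mode == "Z":
--                 result.append(f"Z {' '.join(str(q) for q in d3_cult_qubits)}")
--                 continue
--         result.append(line)
--     return '\n'.join(result)
-- ===== SOURCE B (Python) =====
-- d3_injection_line = 36
-- d3_cult_tdag_line = 78
-- d3_cult_t_line = 100
-- d3_cult_qubits = [0, 3, 7, 9, 10, 12, 13]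
--
-- def build_variant(lines, inj_mode, cult_tdag_mode, cult_t_mode):
--     result = list(lines)
--     zline = "Z " + " ".join(str(q) for q in d3_cult_qubits)
--     if len(result) > d3_injection_line:
--         if inj_mode == "I":
--             result[d3_injection_line] = "TICK"
--         elif inj_mode == "Z":
--             result[d3_injection_line] = "Z 3"
--     if len(result) > d3_cult_tdag_line:
--         if cult_tdag_mode == "I":
--             result[d3_cult_tdag_line] = "TICK"
--         elif cult_tdag_mode == "Z":
--             result[d3_cult_tdag_line] = zline
--     if len(result) > d3_cult_t_line:
--         if cult_t_mode == "I":
--             result[d3_cult_t_line] = "TICK"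
--         elif cult_t_mode == "Z":
--             result[d3_cult_t_line] = zline
--     return '\n'.join(result)
-- ===== Notes on version B (the rewrite author's own statement) =====
-- stated objective: simpler
-- what changed: Replaces the per-line enumerate/branch/continue scan that rebuilds the whole list with a copy-then-point-update: copy the list once and conditionally overwrite only the three fixed positions (36, 78, 100), then join.
import Mathlib
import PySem

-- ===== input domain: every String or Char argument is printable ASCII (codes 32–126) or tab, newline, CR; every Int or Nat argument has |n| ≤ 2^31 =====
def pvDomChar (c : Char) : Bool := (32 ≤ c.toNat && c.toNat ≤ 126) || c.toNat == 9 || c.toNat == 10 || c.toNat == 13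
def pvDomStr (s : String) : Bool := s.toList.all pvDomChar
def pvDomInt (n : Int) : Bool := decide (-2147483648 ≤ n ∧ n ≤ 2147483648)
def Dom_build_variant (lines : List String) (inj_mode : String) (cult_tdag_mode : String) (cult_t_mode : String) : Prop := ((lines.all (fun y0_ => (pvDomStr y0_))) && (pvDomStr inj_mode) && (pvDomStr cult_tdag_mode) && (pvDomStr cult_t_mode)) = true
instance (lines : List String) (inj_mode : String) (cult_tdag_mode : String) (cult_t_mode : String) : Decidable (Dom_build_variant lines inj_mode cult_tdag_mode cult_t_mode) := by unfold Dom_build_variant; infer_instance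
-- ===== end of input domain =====

-- B replaces A's per-line enumerate/branch/continue scan by a copy of the list with
-- conditional point-updates at the three fixed positions 36/78/100, then a join (simpler decomposition).

-- module constants
def d3_injection_line : Int := 36
def d3_cult_tdag_line : Int := 78
def d3_cult_t_line : Int := 100
def d3_cult_qubits : List Int := [0, 3, 7, 9, 10, 12, 13]

-- ===== PORT A =====
-- the string appended for line i (A's nested if/elif/continue chain, one append per iteration)
def pvStepA (inj_mode cult_tdag_mode cult_t_mode : String) (i : Int) (line : String) : String :=
  if i = d3_injection_line ∧ inj_mode = "I" then "TICK"
  else if i = d3_injection_line ∧ inj_mode = "Z" then "Z 3"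
  else if i = d3_cult_tdag_line ∧ cult_tdag_mode = "I" then "TICK"
  else if i = d3_cult_tdag_line ∧ cult_tdag_mode = "Z" then
    "Z " ++ PySem.Str.join " " (d3_cult_qubits.map PySem.Int.toStr)
  else if i = d3_cult_t_line ∧ cult_t_mode = "I" then "TICK"
  else if i = d3_cult_t_line ∧ cult_t_mode = "Z" then
    "Z " ++ PySem.Str.join " " (d3_cult_qubits.map PySem.Int.toStr)
  else line

def build_variant (lines : List String) (inj_mode : String) (cult_tdag_mode : String) (cult_t_mode : String) : String :=
  let result :=
    (PySem.List.enumerate lines).foldl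
      (fun acc p => acc ++ [pvStepA inj_mode cult_tdag_mode cult_t_mode p.1 p.2]) []
  PySem.Str.join "\n" result

-- ===== PORT B =====
-- conditional point-update: overwrite xs[idx] per mode, guarded by a bounds check
def pvPatch (xs : List String) (idx : Nat) (mode : String) (zsub : String) : List String :=
  if idx < xs.length then
    if mode = "I" then xs.set idx "TICK"
    else if mode = "Z" then xs.set idx zsub
    else xs
  else xs

def build_variant_alt (lines : List String) (inj_mode : String) (cult_tdag_mode : String) (cult_t_mode : String) : String :=
  let zline := "Z " ++ PySem.Str.join " " (d3_cult_qubits.map PySem.Int.toStr)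
  let r1 := pvPatch lines 36 inj_mode "Z 3"
  let r2 := pvPatch r1 78 cult_tdag_mode zline
  let r3 := pvPatch r2 100 cult_t_mode zline
  PySem.Str.join "\n" r3

-- ===== PRECONDITION & SPEC =====
def Spec_build_variant (lines : List String) (inj_mode : String) (cult_tdag_mode : String) (cult_t_mode : String) (out : String) : Prop := out = build_variant_alt lines inj_mode cult_tdag_mode cult_t_mode
instance (lines : List String) (inj_mode : String) (cult_tdag_mode : String) (cult_t_mode : String) (out : String) : Decidable (Spec_build_variant lines inj_mode cult_tdag_mode cult_t_mode out) := by unfold Spec_build_variant; infer_instance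

-- ===== CLAIM (what is proved, stated in full; the proofs are below) =====
def Claim_equal_build_variant : Prop := ∀ (lines : List String) (inj_mode : String) (cult_tdag_mode : String) (cult_t_mode : String), Dom_build_variant lines inj_mode cult_tdag_mode cult_t_mode → Spec_build_variant lines inj_mode cult_tdag_mode cult_t_mode (build_variant lines inj_mode cult_tdag_mode cult_t_mode)

-- ===== LEMMAS AND PROOFS =====

-- A's append-only foldl over enumerate is the map of pvStepA over enumerate
theorem pvFoldA_eq_map (f : Int → String → String) (lines : List String) (s : Int)
    (acc : List String) :
    (PySem.List.enumerate lines s).foldl (fun acc p => acc ++ [f p.1 p.2]) acc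
      = acc ++ (PySem.List.enumerate lines s).map (fun p => f p.1 p.2) := by
  induction lines generalizing s acc with
  | nil => simp [PySem.List.enumerate_nil]
  | cons x xs ih => simp [PySem.List.enumerate_cons, ih]

theorem pvPatch_length (xs : List String) (idx : Nat) (mode zsub : String) :
    (pvPatch xs idx mode zsub).length = xs.length := by
  unfold pvPatch; split_ifs <;> simp

theorem pvPatch_getElem (xs : List String) (idx : Nat) (mode zsub : String)
    (i : Nat) (h : i < (pvPatch xs idx mode zsub).length) :
    (pvPatch xs idx mode zsub)[i] =
      if i = idx ∧ mode = "I" then "TICK"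
      else if i = idx ∧ mode = "Z" then zsub
      else xs[i]'(by simpa [pvPatch_length] using h) := by
  have hi : i < xs.length := by simpa [pvPatch_length] using h
  unfold pvPatch
  split_ifs with b1 b2 b3
  · rw [List.getElem_set]
    by_cases hii : i = idx
    · subst hii; simp [b2]
    · have hne : idx ≠ i := fun e => hii e.symm
      simp [hii, hne]
  · rw [List.getElem_set]
    by_cases hii : i = idx
    · subst hii; simp [b3]
    · have hne : idx ≠ i := fun e => hii e.symm
      simp [hii, hne]
  · by_cases hii : i = idx
    · subst hii; simp [b2, b3]
    · simp [hii]
  · have hne : ¬ i = idx := by omega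
    simp [hne]

theorem pvLists_eq (lines : List String) (inj_mode cult_tdag_mode cult_t_mode : String) :
    (PySem.List.enumerate lines 0).map (fun p => pvStepA inj_mode cult_tdag_mode cult_t_mode p.1 p.2)
      = pvPatch (pvPatch (pvPatch lines 36 inj_mode "Z 3") 78 cult_tdag_mode
          ("Z " ++ PySem.Str.join " " (d3_cult_qubits.map PySem.Int.toStr))) 100 cult_t_mode
          ("Z " ++ PySem.Str.join " " (d3_cult_qubits.map PySem.Int.toStr)) := by
  apply List.ext_getElem
  · simp [pvPatch_length, PySem.List.length_enumerate]
  · intro i h1 h2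
    have hi : i < lines.length := by
      simpa [PySem.List.length_enumerate] using h1
    rw [List.getElem_map, PySem.List.getElem_enumerate]
    rw [pvPatch_getElem, pvPatch_getElem, pvPatch_getElem]
    simp only [pvStepA, d3_injection_line, d3_cult_tdag_line, d3_cult_t_line, zero_add]
    have c36 : ((i : Int) = 36) ↔ i = 36 := by omega
    have c78 : ((i : Int) = 78) ↔ i = 78 := by omega
    have c100 : ((i : Int) = 100) ↔ i = 100 := by omega
    simp only [c36, c78, c100]
    by_cases h36 : i = 36 <;> by_cases h78 : i = 78 <;> by_cases h100 : i = 100 <;>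
      simp_all

-- ===== VERDICT (by name: the statement is the Claim_ definition above) =====
theorem build_variant_spec : Claim_equal_build_variant := by
  intro lines inj_mode cult_tdag_mode cult_t_mode _
  show _ = _
  unfold build_variant build_variant_alt
  rw [pvFoldA_eq_map, List.nil_append, pvLists_eq]
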